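-- pv_equiv track=rewrite | github.com/RedT0wer/DNA | Create_Database.py | write_block
-- ===== SOURCE A (Python) =====
-- class Color:
--     red = '<span style="color: red;">'
--     pink = '<span style="color: #FF1493;">'
--     light_blue = '<span style="color: blue;">'
--     base = '<span style="color: black;">'
--
-- def write_block(st,end,index,string1,sub_str):
--     string = ''
--     for i in range(st,end):
--         if sub_str != '' and i == index-1:
--             string += f'{Color.red}{sub_str}({string1[i]}){Color.base}'
--         elif i == index-1:
--             string += f'{Color.red}{string1[i]}{Color.base}'
--         else:
--             string += string1[i]
--     return string + '<br>'
-- ===== SOURCE B (Python) =====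
-- class Color:
--     red = '<span style="color: red;">'
--     pink = '<span style="color: #FF1493;">'
--     light_blue = '<span style="color: blue;">'
--     base = '<span style="color: black;">'
--
-- def write_block(st, end, index, string1, sub_str):
--     if st >= end:
--         return '<br>'
--     p = index - 1
--     if st <= p < end:
--         if sub_str != '':
--             mid = f'{Color.red}{sub_str}({string1[p]}){Color.base}'
--         else:
--             mid = f'{Color.red}{string1[p]}{Color.base}'
--         return string1[st:p] + mid + string1[p+1:end] + '<br>'
--     return string1[st:end] + '<br>'
-- ===== Notes on version B (the rewrite author's own statement) =====
-- stated objective: simpler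
-- what changed: Replaces the per-character loop over range(st,end) with a three-piece slice construction (prefix slice + highlighted middle + suffix slice, or a single slice when the highlighted index is outside the block).
-- outside the precondition, e.g. on write_block(-2, 1, 4, 'abc', 'X'): A returns 'bca<br>', B returns '<br>'
import Mathlib
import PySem

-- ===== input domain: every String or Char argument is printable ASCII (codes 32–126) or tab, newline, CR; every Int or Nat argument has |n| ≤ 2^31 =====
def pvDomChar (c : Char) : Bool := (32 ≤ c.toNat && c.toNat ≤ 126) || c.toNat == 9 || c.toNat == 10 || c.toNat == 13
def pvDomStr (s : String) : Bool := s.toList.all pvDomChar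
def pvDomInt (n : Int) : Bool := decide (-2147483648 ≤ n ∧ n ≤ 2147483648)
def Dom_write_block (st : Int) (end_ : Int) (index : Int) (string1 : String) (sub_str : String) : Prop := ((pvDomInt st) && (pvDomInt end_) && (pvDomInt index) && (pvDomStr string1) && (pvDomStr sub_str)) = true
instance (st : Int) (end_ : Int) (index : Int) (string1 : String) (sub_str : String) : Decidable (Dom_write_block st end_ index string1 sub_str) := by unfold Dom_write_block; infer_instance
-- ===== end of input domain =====

-- B replaces A's per-character loop with a three-piece slice construction (prefix + highlighted middle + suffix); objective: simpler.


-- Color.red / Color.base, as char lists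
def pvRed : List Char := "<span style=\"color: red;\">".toList
def pvBase : List Char := "<span style=\"color: black;\">".toList

-- ===== PORT A =====
def write_block (st : Int) (end_ : Int) (index : Int) (string1 : String) (sub_str : String) : String :=
  let cs := string1.toList
  let body := (PySem.List.pyRange st end_ 1).foldl (fun acc i =>
    if sub_str ≠ "" ∧ i = index - 1 then
      acc ++ (pvRed ++ sub_str.toList ++ ['('] ++ [PySem.List.pyGetD cs i ' '] ++ [')'] ++ pvBase)
    else if i = index - 1 then
      acc ++ (pvRed ++ [PySem.List.pyGetD cs i ' '] ++ pvBase)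
    else
      acc ++ [PySem.List.pyGetD cs i ' ']) []
  String.ofList (body ++ "<br>".toList)

-- ===== PORT B =====
def write_block_alt (st : Int) (end_ : Int) (index : Int) (string1 : String) (sub_str : String) : String :=
  if st ≥ end_ then
    String.ofList "<br>".toList
  else
    let p := index - 1
    let cs := string1.toList
    if st ≤ p ∧ p < end_ then
      let mid := if sub_str ≠ "" then
          pvRed ++ sub_str.toList ++ ['('] ++ [PySem.List.pyGetD cs p ' '] ++ [')'] ++ pvBase
        else
          pvRed ++ [PySem.List.pyGetD cs p ' '] ++ pvBase
      String.ofList (PySem.List.slice cs (some st) (some p) ++ mid ++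
        PySem.List.slice cs (some (p + 1)) (some end_) ++ "<br>".toList)
    else
      String.ofList (PySem.List.slice cs (some st) (some end_) ++ "<br>".toList)

-- ===== PRECONDITION & SPEC =====
-- Pre_ admits an empty block (end_ ≤ st: A's loop never runs) and block bounds within the string
-- (0 ≤ st and end_ ≤ len); it excludes calls with st < end_ and a negative start index, where A
-- either raises IndexError or returns a value built from Python's negative-index wraparound —
-- a defensible corner nobody would specify — while B's slice-based build reads the block literally.
def Pre_write_block (st : Int) (end_ : Int) (index : Int) (string1 : String) (sub_str : String) : Prop :=
  end_ ≤ st ∨ (0 ≤ st ∧ end_ ≤ (string1.toList.length : Int))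
instance (st : Int) (end_ : Int) (index : Int) (string1 : String) (sub_str : String) : Decidable (Pre_write_block st end_ index string1 sub_str) := by unfold Pre_write_block; infer_instance

def pvWitness_write_block : Int × Int × Int × String × String := (0, 3, 2, "abc", "xy")

def Spec_write_block (st : Int) (end_ : Int) (index : Int) (string1 : String) (sub_str : String) (out : String) : Prop := out = write_block_alt st end_ index string1 sub_str
instance (st : Int) (end_ : Int) (index : Int) (string1 : String) (sub_str : String) (out : String) : Decidable (Spec_write_block st end_ index string1 sub_str out) := by unfold Spec_write_block; infer_instance

-- ===== CLAIM (what is proved, stated in full; the proofs are below) =====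
def Claim_equal_write_block : Prop := ∀ (st : Int) (end_ : Int) (index : Int) (string1 : String) (sub_str : String), Dom_write_block st end_ index string1 sub_str → Pre_write_block st end_ index string1 sub_str → Spec_write_block st end_ index string1 sub_str (write_block st end_ index string1 sub_str)

-- ===== LEMMAS AND PROOFS =====

-- the list A's loop appends for one index i
def pvPiece (cs : List Char) (sub_str : String) (index : Int) (i : Int) : List Char :=
  if sub_str ≠ "" ∧ i = index - 1 then
    pvRed ++ sub_str.toList ++ ['('] ++ [PySem.List.pyGetD cs i ' '] ++ [')'] ++ pvBase
  else if i = index - 1 then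
    pvRed ++ [PySem.List.pyGetD cs i ' '] ++ pvBase
  else
    [PySem.List.pyGetD cs i ' ']

theorem pvFoldl_eq_flatMap (cs : List Char) (sub_str : String) (index : Int) (l : List Int) :
    l.foldl (fun acc i =>
      if sub_str ≠ "" ∧ i = index - 1 then
        acc ++ (pvRed ++ sub_str.toList ++ ['('] ++ [PySem.List.pyGetD cs i ' '] ++ [')'] ++ pvBase)
      else if i = index - 1 then
        acc ++ (pvRed ++ [PySem.List.pyGetD cs i ' '] ++ pvBase)
      else
        acc ++ [PySem.List.pyGetD cs i ' ']) [] = l.flatMap (pvPiece cs sub_str index) := by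
  have h : (fun (acc : List Char) (i : Int) =>
      if sub_str ≠ "" ∧ i = index - 1 then
        acc ++ (pvRed ++ sub_str.toList ++ ['('] ++ [PySem.List.pyGetD cs i ' '] ++ [')'] ++ pvBase)
      else if i = index - 1 then
        acc ++ (pvRed ++ [PySem.List.pyGetD cs i ' '] ++ pvBase)
      else
        acc ++ [PySem.List.pyGetD cs i ' ']) = fun acc i => acc ++ pvPiece cs sub_str index i := by
    funext acc i
    unfold pvPiece
    split_ifs <;> rfl
  rw [h, PySem.List.foldl_append_eq_flatMap]
  rfl

theorem pvFlatMap_single {α β : Type} (l : List α) (f : α → β) :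
    l.flatMap (fun x => [f x]) = l.map f := by
  induction l with
  | nil => rfl
  | cons x xs ih => simp [List.flatMap_cons, ih]

-- flatMap of the plain branch over an in-bounds range is the slice
theorem pvFlat_slice (cs : List Char) (a b : Int) (h0 : 0 ≤ a) (hab : a ≤ b)
    (hb : b ≤ (cs.length : Int)) :
    (PySem.List.pyRange a b 1).flatMap (fun i => [PySem.List.pyGetD cs i ' ']) =
      PySem.List.slice cs (some a) (some b) := by
  rw [PySem.List.pyRange_one, PySem.List.slice_toNat cs h0 (le_trans h0 hab)]
  rw [List.flatMap_map, pvFlatMap_single]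
  apply List.ext_getElem
  · simp only [List.length_map, List.length_range, List.length_take, List.length_drop]
    omega
  · intro k h1 h2
    simp only [List.length_map, List.length_range] at h1
    have hk0 : (0:Int) ≤ a + k := by omega
    have hklt : a + (k:Int) < (cs.length : Int) := by omega
    rw [List.getElem_map, List.getElem_range,
        PySem.List.pyGetD_eq_getElem cs ' ' hk0 hklt,
        List.getElem_take, List.getElem_drop]
    congr 1
    omega

theorem pvFlat_plain (cs : List Char) (sub_str : String) (index : Int) (a b : Int)
    (hno : ∀ i, a ≤ i → i < b → i ≠ index - 1) :
    (PySem.List.pyRange a b 1).flatMap (pvPiece cs sub_str index) =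
      (PySem.List.pyRange a b 1).flatMap (fun i => [PySem.List.pyGetD cs i ' ']) := by
  rw [List.flatMap_def, List.flatMap_def]
  congr 1
  apply List.map_congr_left
  intro i hi
  rw [PySem.List.mem_pyRange_one] at hi
  unfold pvPiece
  have : i ≠ index - 1 := hno i hi.1 hi.2
  simp [this]

theorem pvRange_empty (a b : Int) (h : b ≤ a) : PySem.List.pyRange a b 1 = [] := by
  rw [PySem.List.pyRange_one]
  have : (b - a).toNat = 0 := by omega
  simp [this]

-- ===== VERDICT (by name: the statement is the Claim_ definition above) =====
theorem write_block_spec : Claim_equal_write_block := by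
  intro st end_ index string1 sub_str _ hpre
  unfold Spec_write_block write_block write_block_alt
  simp only []
  rw [pvFoldl_eq_flatMap]
  by_cases hse : end_ ≤ st
  · rw [pvRange_empty st end_ hse, if_pos hse]
    rfl
  · have hlt : st < end_ := by omega
    have hdom : 0 ≤ st ∧ end_ ≤ (string1.toList.length : Int) := by
      rcases hpre with h | h
      · omega
      · exact h
    rw [if_neg hse]
    set cs := string1.toList with hcs
    set p := index - 1 with hp
    by_cases hmid : st ≤ p ∧ p < end_
    · rw [if_pos hmid]
      have hsplit : PySem.List.pyRange st end_ 1 =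
          PySem.List.pyRange st p 1 ++ PySem.List.pyRange p (p+1) 1 ++ PySem.List.pyRange (p+1) end_ 1 := by
        rw [PySem.List.pyRange_one_append st p end_ hmid.1 (by omega),
            PySem.List.pyRange_one_append p (p+1) end_ (by omega) (by omega),
            List.append_assoc]
      have hsingle : PySem.List.pyRange p (p+1) 1 = [p] := by
        rw [PySem.List.pyRange_one_cons (by omega), pvRange_empty (p+1) (p+1) le_rfl]
      rw [hsplit, List.flatMap_append, List.flatMap_append, hsingle]
      rw [pvFlat_plain cs sub_str index st p (by intro i h1 h2; omega),
          pvFlat_plain cs sub_str index (p+1) end_ (by intro i h1 h2; omega),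
          pvFlat_slice cs st p hdom.1 hmid.1 (by omega),
          pvFlat_slice cs (p+1) end_ (by omega) (by omega) (by omega)]
      have hpiece : pvPiece cs sub_str index p =
          (if sub_str ≠ "" then
            pvRed ++ sub_str.toList ++ ['('] ++ [PySem.List.pyGetD cs p ' '] ++ [')'] ++ pvBase
          else pvRed ++ [PySem.List.pyGetD cs p ' '] ++ pvBase) := by
        unfold pvPiece
        by_cases hsub : sub_str = "" <;> simp [hsub, hp]
      rw [List.flatMap_cons, List.flatMap_nil, List.append_nil, hpiece]
    · rw [if_neg hmid]
      rw [pvFlat_plain cs sub_str index st end_ (by intro i h1 h2 he; exact hmid ⟨by omega, by omega⟩),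
          pvFlat_slice cs st end_ hdom.1 (by omega) hdom.2]
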